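-- pv_equiv track=rewrite | github.com/AnnaVitkina/transformation-rates | expand_additional_zoning.py | _build_additional_zoning_lookup
-- ===== SOURCE A (Python) =====
-- from collections import defaultdict
--
-- def _build_additional_zoning_lookup(additional_zoning_rows):
--     """
--     Build a lookup: starred_country_key -> [additional_info, ...]
--     preserving occurrence order.
--
--     e.g. "GROOT BRIT. (GB) *1" -> ["LONDONDERRY (LDY), BELFAST (BFS)", ...]
--
--     Rows with no Country but with AdditionalInfo are attached to the last seen Country.
--     """
--     lookup = defaultdict(list)   # key -> list of AdditionalInfo strings (in order)
--     last_country = None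
--
--     for row in additional_zoning_rows:
--         country = (row.get('Country') or '').strip()
--         info = (row.get('AdditionalInfo') or '').strip()
--
--         if country and '*' in country:
--             last_country = country
--             # If this row also has AdditionalInfo, store it immediately
--             if info:
--                 lookup[country].append(info)
--         elif not country and info and last_country:
--             # Continuation row: attach info to the last starred country
--             lookup[last_country].append(info)
--
--     return lookup
-- ===== SOURCE B (Python) =====
-- from collections import defaultdict
--
-- def _build_additional_zoning_lookup(additional_zoning_rows):
--     # Normalize once: (country, info) stripped pairs.
--     pairs = [((row.get('Country') or '').strip(),
--               (row.get('AdditionalInfo') or '').strip())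
--              for row in additional_zoning_rows]
--
--     def is_starred(p):
--         return bool(p[0]) and '*' in p[0]
--
--     # Recursively split the pair list into segments, each headed by a starred
--     # country row; rows before the first starred row are dropped.  A segment's
--     # info list is the head's own info (if any) plus the infos of the
--     # empty-country rows in its body.
--     def segments(ps):
--         if not ps:
--             return []
--         head, rest = ps[0], ps[1:]
--         if not is_starred(head):
--             return segments(rest)
--         i = 0
--         while i < len(rest) and not is_starred(rest[i]):
--             i += 1
--         infos = ([head[1]] if head[1] else []) \
--             + [info for c, info in rest[:i] if not c and info]
--         return [(head[0], infos)] + segments(rest[i:])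
--
--     # Group the segments by key, preserving first-occurrence order.
--     lookup = defaultdict(list)
--     for key, infos in segments(pairs):
--         if infos:
--             lookup[key].extend(infos)
--     return lookup
-- ===== Notes on version B (the rewrite author's own statement) =====
-- stated objective: alternative
-- what changed: Replaced the single stateful dict-mutating scan with a recursive segmentation: the rows are normalized, recursively split into segments headed by starred-country rows (collecting each segment's infos at once), and the segments are then grouped into the defaultdict.
import Mathlib
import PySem

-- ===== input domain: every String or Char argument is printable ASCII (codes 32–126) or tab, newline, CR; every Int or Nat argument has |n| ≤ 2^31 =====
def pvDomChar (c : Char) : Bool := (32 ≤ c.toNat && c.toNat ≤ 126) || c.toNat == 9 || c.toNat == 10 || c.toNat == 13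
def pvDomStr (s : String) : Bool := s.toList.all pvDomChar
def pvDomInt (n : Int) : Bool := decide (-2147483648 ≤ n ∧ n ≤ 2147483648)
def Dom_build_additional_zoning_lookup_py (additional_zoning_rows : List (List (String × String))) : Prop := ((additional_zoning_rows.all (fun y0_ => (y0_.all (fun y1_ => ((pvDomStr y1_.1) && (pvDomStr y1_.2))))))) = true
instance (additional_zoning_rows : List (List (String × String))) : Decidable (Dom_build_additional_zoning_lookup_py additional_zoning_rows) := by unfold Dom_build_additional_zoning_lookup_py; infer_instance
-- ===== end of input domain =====

-- B replaces A's single stateful dict-mutating scan by a recursive segmentation: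
-- normalize the rows, recursively split them into segments headed by starred-country
-- rows, then group the segments into the dict; same cost, return value proved equal.

-- ===== PORT A =====
-- (row.get(k) or '') : first-match lookup, None -> ''  (exact: '' or '' is '')
def pvGetField (row : List (String × String)) (k : String) : String :=
  ((PySem.Dict.mk row).get? k).getD ""

-- defaultdict(list): lookup[k].append(v)
def pvDDAppend (d : PySem.Dict String (List String)) (k : String) (v : String) :
    PySem.Dict String (List String) :=
  d.insert k (d.getD k [] ++ [v])

def pvStepA (st : PySem.Dict String (List String) × Option String)
    (row : List (String × String)) : PySem.Dict String (List String) × Option String :=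
  let country := PySem.Str.strip (pvGetField row "Country")
  let info := PySem.Str.strip (pvGetField row "AdditionalInfo")
  if country ≠ "" ∧ PySem.Str.isIn "*" country then
    (if info ≠ "" then pvDDAppend st.1 country info else st.1, some country)
  else if country = "" ∧ info ≠ "" ∧ st.2.getD "" ≠ "" then
    (pvDDAppend st.1 (st.2.getD "") info, st.2)
  else st

def build_additional_zoning_lookup_py (additional_zoning_rows : List (List (String × String))) : List (String × List String) :=
  (additional_zoning_rows.foldl pvStepA (PySem.Dict.empty, none)).1.items

-- ===== PORT B =====
-- normalized (country, info) pair of a row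
def pvNormRow (row : List (String × String)) : String × String :=
  (PySem.Str.strip (pvGetField row "Country"), PySem.Str.strip (pvGetField row "AdditionalInfo"))

def pvStarred (p : String × String) : Bool := p.1 != "" && PySem.Str.isIn "*" p.1

-- recursive segmentation: each segment is headed by a starred row; its info list is
-- the head's own info plus the infos of the empty-country rows of its body
def pvSegments : List (String × String) → List (String × List String)
  | [] => []
  | p :: rest =>
    if pvStarred p then
      (p.1, (if p.2 ≠ "" then [p.2] else []) ++
        ((rest.takeWhile (fun q => !pvStarred q)).filter
            (fun q => q.1 == "" && q.2 != "")).map Prod.snd)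
        :: pvSegments (rest.dropWhile (fun q => !pvStarred q))
    else pvSegments rest
termination_by ps => ps.length
decreasing_by
  · have h := List.length_dropWhile_le (p := fun q => !pvStarred q) (l := rest)
    simp only [List.length_cons]; omega
  · simp

def build_additional_zoning_lookup_py_alt (additional_zoning_rows : List (List (String × String))) : List (String × List String) :=
  ((pvSegments (additional_zoning_rows.map pvNormRow)).foldl
      (fun d (s : String × List String) =>
        if s.2 ≠ [] then d.insert s.1 (d.getD s.1 [] ++ s.2) else d)
      PySem.Dict.empty).items

-- ===== PRECONDITION & SPEC =====
def Spec_build_additional_zoning_lookup_py (additional_zoning_rows : List (List (String × String))) (out : List (String × List String)) : Prop := out = build_additional_zoning_lookup_py_alt additional_zoning_rows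
instance (additional_zoning_rows : List (List (String × String))) (out : List (String × List String)) : Decidable (Spec_build_additional_zoning_lookup_py additional_zoning_rows out) := by unfold Spec_build_additional_zoning_lookup_py; infer_instance

-- ===== CLAIM (what is proved, stated in full; the proofs are below) =====
def Claim_equal_build_additional_zoning_lookup_py : Prop := ∀ (additional_zoning_rows : List (List (String × String))), Dom_build_additional_zoning_lookup_py additional_zoning_rows → Spec_build_additional_zoning_lookup_py additional_zoning_rows (build_additional_zoning_lookup_py additional_zoning_rows)

-- ===== LEMMAS AND PROOFS =====

-- replaying a flat list of (key, info) append events over a dict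
def pvReplay (d : PySem.Dict String (List String)) (es : List (String × String)) :
    PySem.Dict String (List String) :=
  es.foldl (fun d e => pvDDAppend d e.1 e.2) d

-- the append events A's scan emits, as a recursion over the normalized pairs
def pvScanE : Option String → List (String × String) → List (String × String)
  | _, [] => []
  | a, p :: ps =>
    if pvStarred p then
      (if p.2 ≠ "" then [(p.1, p.2)] else []) ++ pvScanE (some p.1) ps
    else if p.1 = "" ∧ p.2 ≠ "" ∧ a.getD "" ≠ "" then
      (a.getD "", p.2) :: pvScanE a ps
    else pvScanE a ps

-- one A step: the dict side replays the head's scan events, the state side is nextA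
theorem pvA_step1 (d : PySem.Dict String (List String)) (lc : Option String)
    (row : List (String × String)) :
    (pvStepA (d, lc) row).2
      = if pvStarred (pvNormRow row) then some (pvNormRow row).1 else lc := by
  unfold pvStepA pvNormRow pvStarred
  dsimp only
  split_ifs <;> simp_all [bne]

theorem pvA_step2 (d : PySem.Dict String (List String)) (lc : Option String)
    (row : List (String × String)) :
    (pvStepA (d, lc) row).1 = pvReplay d (pvScanE lc [pvNormRow row]) := by
  unfold pvStepA pvNormRow pvReplay
  dsimp only
  split_ifs <;> simp_all [bne, pvScanE, pvStarred] <;> split_ifs <;> simp_all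

-- the scan peels one head row
theorem pvScan_cons (lc : Option String) (p : String × String)
    (ps : List (String × String)) :
    pvScanE lc (p :: ps)
      = pvScanE lc [p] ++ pvScanE (if pvStarred p then some p.1 else lc) ps := by
  simp only [pvScanE]
  split_ifs <;> simp_all

-- A's fold from any state = replaying its scan events
theorem pvA_scan (rows : List (List (String × String)))
    (d : PySem.Dict String (List String)) (lc : Option String) :
    (rows.foldl pvStepA (d, lc)).1 = pvReplay d (pvScanE lc (rows.map pvNormRow)) := by
  induction rows generalizing d lc with
  | nil => simp [pvScanE, pvReplay]
  | cons row rest ih =>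
    simp only [List.foldl_cons, List.map_cons]
    rw [pvScan_cons, pvReplay, List.foldl_append, ← pvReplay, ← pvReplay, ← pvA_step2 d lc row]
    rcases h : pvStepA (d, lc) row with ⟨d1, lc1⟩
    have h2 := pvA_step1 d lc row
    rw [h] at h2; dsimp only at h2 ⊢; rw [← h2, ih]

-- the scan from an active key k ≠ "": continuation events over the unstarred prefix,
-- then the scan of the rest (whose head, if any, is starred)
theorem pvScan_some (ps : List (String × String)) (k : String) (hk : k ≠ "") :
    pvScanE (some k) ps
      = ((ps.takeWhile (fun q => !pvStarred q)).filter
            (fun q => q.1 == "" && q.2 != "")).map (fun q => (k, q.2))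
        ++ pvScanE none (ps.dropWhile (fun q => !pvStarred q)) := by
  induction ps with
  | nil => simp [pvScanE]
  | cons q ps ih =>
    by_cases hq : pvStarred q = true
    · simp [pvScanE, hq]
    · have hq1 : (q.1 = "" ∧ q.2 ≠ "" ∧ (some k).getD "" ≠ "") ↔ (q.1 == "" && q.2 != "") = true := by
        simp [bne, hk]
      by_cases hqq : (q.1 == "" && q.2 != "") = true
      · simp [pvScanE, hq, hq1.mpr hqq, ih, hk]
      · have hkk : q.1 = "" → ¬q.2 = "" → k = "" := by
          intro h1 h2
          exact absurd (by simp [h1, h2, bne]) hqq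
        simp [pvScanE, hq, hqq, ih]
        exact hkk

-- the scan with no active key = the flattened segment events
theorem pvScan_none (ps : List (String × String)) :
    pvScanE none ps
      = (pvSegments ps).flatMap (fun s => s.2.map (fun v => (s.1, v))) := by
  induction ps using pvSegments.induct with
  | case1 => simp [pvScanE, pvSegments]
  | case2 p rest hp ih =>
    have hp1 : p.1 ≠ "" := by
      rcases p with ⟨c, i⟩; simp [pvStarred, bne] at hp; exact hp.1
    rw [pvSegments]
    simp only [hp, if_pos]
    rw [List.flatMap_cons, ← ih]
    simp only [pvScanE, hp, if_pos]
    rw [pvScan_some rest p.1 hp1]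
    simp [List.map_map]
    split_ifs <;> simp
  | case3 p rest hp ih =>
    rw [pvSegments]
    simp only [hp, if_neg, Bool.not_eq_true]
    have : ¬ (p.1 = "" ∧ p.2 ≠ "" ∧ (none : Option String).getD "" ≠ "") := by simp
    simp [pvScanE, hp, ih]

-- replaying all events of one key in a row = a single grouped insert
theorem pvReplay_one_key (vs : List String) (k : String)
    (d : PySem.Dict String (List String)) :
    pvReplay d (vs.map (fun v => (k, v)))
      = if vs ≠ [] then d.insert k (d.getD k [] ++ vs) else d := by
  induction vs generalizing d with
  | nil => simp [pvReplay]
  | cons v vs ih =>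
    simp only [List.map_cons, pvReplay, List.foldl_cons]
    have : (vs.map (fun v => (k, v))).foldl (fun d e => pvDDAppend d e.1 e.2) (pvDDAppend d k v)
        = pvReplay (pvDDAppend d k v) (vs.map (fun v => (k, v))) := rfl
    rw [this, ih]
    rcases vs with _ | ⟨w, ws⟩
    · simp [pvDDAppend]
    · simp [pvDDAppend, PySem.Dict.getD_insert_self, PySem.Dict.insert_insert_self,
        List.append_assoc]

-- the grouped fold over segments = replaying the flattened events
theorem pvFold_segs (segs : List (String × List String))
    (d : PySem.Dict String (List String)) :
    segs.foldl
        (fun d (s : String × List String) =>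
          if s.2 ≠ [] then d.insert s.1 (d.getD s.1 [] ++ s.2) else d) d
      = pvReplay d (segs.flatMap (fun s => s.2.map (fun v => (s.1, v)))) := by
  induction segs generalizing d with
  | nil => simp [pvReplay]
  | cons s segs ih =>
    simp only [List.foldl_cons, List.flatMap_cons, pvReplay, List.foldl_append]
    rw [ih, ← pvReplay_one_key s.2 s.1 d]
    rfl

-- ===== VERDICT (by name: the statement is the Claim_ definition above) =====
theorem build_additional_zoning_lookup_py_spec : Claim_equal_build_additional_zoning_lookup_py := by
  intro rows _
  unfold Spec_build_additional_zoning_lookup_py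
  unfold build_additional_zoning_lookup_py build_additional_zoning_lookup_py_alt
  rw [pvA_scan rows PySem.Dict.empty none, pvScan_none, pvFold_segs]
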